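-- pv_equiv track=rewrite | github.com/HyperAgents/hmas | .acimov/profile_check/parsing.py | get_subject_id_part
-- ===== SOURCE A (Python) =====
-- def get_subject_id_part(fragment_list):
--     modules = [item for item in fragment_list if item.startswith("src/")]
--     modules = ['.'.join(item[4:].split('.')[:-1]) for item in modules]
--     modules.sort()
--     modelets = [item for item in fragment_list if item.startswith("domains/")]
--     modelets = ['-'.join(item.split('/')[1:-1]) for item in modelets]
--     modelets.sort()
--
--     subject_id_part = '-'.join(modules + modelets)
--     return subject_id_part
-- ===== SOURCE B (Python) =====
-- def _insert_sorted(lst, x):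
--     # insert x into an already-sorted list, after any equal elements
--     i = 0
--     while i < len(lst) and lst[i] <= x:
--         i += 1
--     lst.insert(i, x)
--
--
-- def get_subject_id_part(fragment_list):
--     # online insertion sort: one classifying pass that keeps the two
--     # accumulators sorted at all times, so no sort step is needed at the end
--     modules = []
--     modelets = []
--     for item in fragment_list:
--         if item.startswith("src/"):
--             _insert_sorted(modules, '.'.join(item[4:].split('.')[:-1]))
--         elif item.startswith("domains/"):
--             _insert_sorted(modelets, '-'.join(item.split('/')[1:-1]))
--     return '-'.join(modules + modelets)
-- ===== Notes on version B (the rewrite author's own statement) =====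
-- stated objective: alternative
-- what changed: Replaces A's staged filter/map comprehensions plus two .sort() calls by a single classifying pass that maintains the modules and modelets accumulators as sorted lists via incremental sorted insertion (online insertion sort), so the data is traversed once and no separate sort step exists.
import Mathlib
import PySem

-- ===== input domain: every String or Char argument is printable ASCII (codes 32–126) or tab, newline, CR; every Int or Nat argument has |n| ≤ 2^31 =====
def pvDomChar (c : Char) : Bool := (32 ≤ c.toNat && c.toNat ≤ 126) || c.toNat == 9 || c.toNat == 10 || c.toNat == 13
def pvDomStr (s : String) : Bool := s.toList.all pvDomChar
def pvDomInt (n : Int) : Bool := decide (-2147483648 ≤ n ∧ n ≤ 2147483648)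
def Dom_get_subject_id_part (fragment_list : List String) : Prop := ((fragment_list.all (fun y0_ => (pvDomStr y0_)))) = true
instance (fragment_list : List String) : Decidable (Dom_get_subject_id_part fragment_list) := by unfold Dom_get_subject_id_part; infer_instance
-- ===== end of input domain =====

-- B replaces A's staged filter/map comprehensions plus two sorts by one classifying
-- pass that keeps both accumulators sorted via incremental sorted insertion (objective: alternative).


-- ===== PORT A =====
-- '.'.join(item[4:].split('.')[:-1])
def pvModuleName (item : String) : String :=
  PySem.Str.join "." (PySem.List.slice (((PySem.Str.split? (PySem.Str.slice item (some 4) none) ".").getD [])) none (some (-1)))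

-- '-'.join(item.split('/')[1:-1])
def pvModeletName (item : String) : String :=
  PySem.Str.join "-" (PySem.List.slice (((PySem.Str.split? item "/").getD [])) (some 1) (some (-1)))

def get_subject_id_part (fragment_list : List String) : String :=
  let modules := fragment_list.filter (fun item => PySem.Str.startswith item "src/")
  let modules := modules.map pvModuleName
  let modules := PySem.List.sorted modules (fun x => x) false
  let modelets := fragment_list.filter (fun item => PySem.Str.startswith item "domains/")
  let modelets := modelets.map pvModeletName
  let modelets := PySem.List.sorted modelets (fun x => x) false
  PySem.Str.join "-" (modules ++ modelets)

-- ===== PORT B =====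
-- _insert_sorted: scan past the elements <= x, insert x there (after any equal ones)
def pvInsertSorted (lst : List String) (x : String) : List String :=
  match lst with
  | [] => [x]
  | y :: ys => if y ≤ x then y :: pvInsertSorted ys x else x :: y :: ys

-- body of B's single classifying loop: dispatch and keep each accumulator sorted
def pvStep (acc : List String × List String) (item : String) : List String × List String :=
  if PySem.Str.startswith item "src/" then
    (pvInsertSorted acc.1 (pvModuleName item), acc.2)
  else if PySem.Str.startswith item "domains/" then
    (acc.1, pvInsertSorted acc.2 (pvModeletName item))
  else acc

def get_subject_id_part_alt (fragment_list : List String) : String :=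
  let p := fragment_list.foldl pvStep ([], [])
  PySem.Str.join "-" (p.1 ++ p.2)

-- ===== PRECONDITION & SPEC =====
def Spec_get_subject_id_part (fragment_list : List String) (out : String) : Prop := out = get_subject_id_part_alt fragment_list
instance (fragment_list : List String) (out : String) : Decidable (Spec_get_subject_id_part fragment_list out) := by unfold Spec_get_subject_id_part; infer_instance

-- ===== CLAIM (what is proved, stated in full; the proofs are below) =====
def Claim_equal_get_subject_id_part : Prop := ∀ (fragment_list : List String), Dom_get_subject_id_part fragment_list → Spec_get_subject_id_part fragment_list (get_subject_id_part fragment_list)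

-- ===== LEMMAS AND PROOFS =====

-- no string starts with both "src/" and "domains/"
theorem pv_not_both (l : List Char) (h : PySem.Chars.startswith l ['s','r','c','/'] = true) :
    PySem.Chars.startswith l ['d','o','m','a','i','n','s','/'] = false := by
  by_contra hc
  rw [Bool.not_eq_false] at hc
  rw [PySem.Chars.startswith_iff] at h hc
  obtain ⟨t1, h1⟩ := h
  obtain ⟨t2, h2⟩ := hc
  rw [← h2] at h1
  simp at h1

theorem pv_perm_insertSorted (l : List String) (x : String) : (pvInsertSorted l x).Perm (x :: l) := by
  induction l with
  | nil => simp [pvInsertSorted]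
  | cons y ys ih =>
    simp only [pvInsertSorted]
    split_ifs
    · exact (ih.cons y).trans (List.Perm.swap x y ys)
    · exact List.Perm.refl _

theorem pv_mem_insertSorted {l : List String} {x z : String} (h : z ∈ pvInsertSorted l x) :
    z = x ∨ z ∈ l := by
  have := (pv_perm_insertSorted l x).mem_iff.mp h
  simpa using this

theorem pv_sorted_insertSorted (l : List String) (x : String)
    (h : l.Pairwise (· ≤ ·)) : (pvInsertSorted l x).Pairwise (· ≤ ·) := by
  induction l with
  | nil => simp [pvInsertSorted]
  | cons y ys ih =>
    rw [List.pairwise_cons] at h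
    simp only [pvInsertSorted]
    split_ifs with hle
    · rw [List.pairwise_cons]
      refine ⟨?_, ih h.2⟩
      intro z hz
      rcases pv_mem_insertSorted hz with rfl | hz
      · exact hle
      · exact h.1 z hz
    · rw [List.pairwise_cons]
      refine ⟨?_, List.pairwise_cons.mpr h⟩
      intro z hz
      rcases List.mem_cons.mp hz with rfl | hz
      · exact le_of_not_ge hle
      · exact le_of_lt (lt_of_not_ge hle) |>.trans (h.1 z hz)

-- the single classifying pass equals the two staged filter/map/insert pipelines
theorem pv_loop_eq (l : List String) (m d : List String) :
    l.foldl pvStep (m, d) =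
      (((l.filter (fun item => PySem.Str.startswith item "src/")).map pvModuleName).foldl pvInsertSorted m,
       ((l.filter (fun item => PySem.Str.startswith item "domains/")).map pvModeletName).foldl pvInsertSorted d) := by
  induction l generalizing m d with
  | nil => simp
  | cons x xs ih =>
    simp only [List.foldl_cons, List.filter_cons]
    by_cases hs : PySem.Chars.startswith x.toList ['s','r','c','/'] = true
    · have hd := pv_not_both x.toList hs
      simp [pvStep, PySem.Str.startswith, hs, hd, ih]
    · by_cases hd : PySem.Chars.startswith x.toList ['d','o','m','a','i','n','s','/'] = true
      · simp [pvStep, PySem.Str.startswith, hs, hd, ih]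
      · simp [pvStep, PySem.Str.startswith, hs, hd, ih]

-- foldl of insertion from [] is the foldr insertion sort (insertion is order-insensitive
-- only through the sorted-result characterisation, so we go through sorted on both sides)
theorem pv_foldl_perm (l m : List String) : (l.foldl pvInsertSorted m).Perm (m ++ l) := by
  induction l generalizing m with
  | nil => simp
  | cons x xs ih =>
    refine (ih (pvInsertSorted m x)).trans ?_
    exact ((pv_perm_insertSorted m x).append_right xs).trans List.perm_middle.symm

theorem pv_foldl_sorted (l m : List String) (hm : m.Pairwise (· ≤ ·)) :
    (l.foldl pvInsertSorted m).Pairwise (· ≤ ·) := by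
  induction l generalizing m with
  | nil => exact hm
  | cons x xs ih => exact ih _ (pv_sorted_insertSorted m x hm)

theorem pv_foldl_ins_eq_sorted (l : List String) :
    l.foldl pvInsertSorted [] = PySem.List.sorted l (fun x => x) false :=
  (PySem.List.sorted_id_eq_of_perm_of_pairwise _ _ (by simpa using pv_foldl_perm l [])
    (pv_foldl_sorted l [] (by simp))).symm

-- ===== VERDICT (by name: the statement is the Claim_ definition above) =====
theorem get_subject_id_part_spec : Claim_equal_get_subject_id_part := by
  intro fragment_list _
  unfold Spec_get_subject_id_part get_subject_id_part get_subject_id_part_alt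
  rw [pv_loop_eq]
  simp [pv_foldl_ins_eq_sorted]
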